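-- pv_equiv track=rewrite | github.com/iethree/wan-party-bot | corpora/cmudict/rhymes.py | get_phoneme_count_to_rhyme
-- ===== SOURCE A (Python) =====
-- DIGITS = [str(x) for x in range(0, 10)]
--
-- def get_phoneme_count_to_rhyme(phoneme_input: str) -> int:
--     """
--     1: End Rhymes (blue/shoe) final vowel and following consonant sounds
--     2: Last Syllable Rhymes (timber/harbor) consonant, vowel, consonant
--     3: Double Rhyme (conviction/prediction) second to last syllable and all following
--     4: Triple Rhyme (transportation/dissertation) triple to last syllable and all following
--     """
--     # get a count of syllables in word
--     syllable_count = 0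
--     syllable_location = []
--     vowel_location = []
--     phoneme_filtered = []
--     for i, phoneme in enumerate(phoneme_input):
--         for digit in DIGITS:
--             if digit in phoneme:
--                 syllable_count += 1
--                 phoneme_filtered.append(phoneme.replace(digit, ""))
--                 syllable_location.append(i)
--                 break
--             if digit == "9":
--                 phoneme_filtered.append(phoneme)
--                 vowel_location.append(i)
--
--     count = 0
--     results = []
--
--     try:
--         # first case in description
--         results.append(len(phoneme_input) - vowel_location[-1])
--         # second case in description
--         results.append(len(phoneme_input) - syllable_location[-1])
--         # third case in description
--         results.append(len(phoneme_input) - syllable_location[-2])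
--         # fourth case in description
--         results.append(len(phoneme_input) - syllable_location[-3])
--     except IndexError:
--         pass
--
--     return results
-- ===== SOURCE B (Python) =====
-- DIGITS = [str(x) for x in range(0, 10)]
--
-- def get_phoneme_count_to_rhyme(phoneme_input):
--     # Single backward scan: grab the last non-digit phoneme index and the last
--     # up-to-3 digit-bearing (syllable) indices, then emit the distances in order.
--     n = len(phoneme_input)
--     last_plain = None
--     syllables_from_end = []
--     for i in range(n - 1, -1, -1):
--         p = phoneme_input[i]
--         if any(d in p for d in DIGITS):
--             if len(syllables_from_end) < 3:
--                 syllables_from_end.append(i)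
--         elif last_plain is None:
--             last_plain = i
--     if last_plain is None:
--         return []
--     return [n - last_plain] + [n - j for j in syllables_from_end]
-- ===== Notes on version B (the rewrite author's own statement) =====
-- stated objective: alternative
-- what changed: A makes a forward enumerate pass with an inner loop over the ten digit strings (building count/filtered/location lists) and then a try/except chain of negative indexings; B makes one backward index scan keeping only the last non-digit index and the last up-to-3 digit-bearing indices, then emits the distances directly.
import Mathlib
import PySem

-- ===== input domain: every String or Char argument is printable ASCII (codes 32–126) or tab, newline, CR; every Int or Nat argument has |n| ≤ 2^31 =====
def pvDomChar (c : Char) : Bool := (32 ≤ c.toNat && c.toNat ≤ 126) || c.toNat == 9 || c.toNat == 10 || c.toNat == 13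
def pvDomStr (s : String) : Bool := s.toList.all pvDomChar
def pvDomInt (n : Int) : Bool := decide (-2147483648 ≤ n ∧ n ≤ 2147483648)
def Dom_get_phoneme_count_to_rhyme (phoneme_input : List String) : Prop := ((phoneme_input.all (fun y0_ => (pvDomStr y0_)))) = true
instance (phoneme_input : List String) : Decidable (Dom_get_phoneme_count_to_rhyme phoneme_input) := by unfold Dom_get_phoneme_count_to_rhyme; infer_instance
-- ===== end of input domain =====

-- B replaces A's forward enumerate pass + try/except negative indexing by one backward
-- index scan keeping only the needed indices (alternative decomposition, same cost).


-- DIGITS = [str(x) for x in range(0, 10)]  (module constant, used by both programs)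
def pvDIGITS : List String := (PySem.List.pyRange 0 10 1).map (fun x => PySem.Int.toStr x)

-- ===== PORT A =====
-- inner 'for digit in DIGITS' loop; state = (syllable_count, phoneme_filtered, syllable_location, vowel_location)
def pvInnerA (i : Int) (phoneme : String) (st : Int × List String × List Int × List Int) :
    List String → Int × List String × List Int × List Int
  | [] => st
  | digit :: rest =>
    if PySem.Str.isIn digit phoneme then
      -- syllable_count += 1; phoneme_filtered.append(phoneme.replace(digit, "")); syllable_location.append(i); break
      (st.1 + 1, st.2.1 ++ [PySem.Str.replace phoneme digit ""], st.2.2.1 ++ [i], st.2.2.2)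
    else if digit == "9" then
      -- phoneme_filtered.append(phoneme); vowel_location.append(i)
      pvInnerA i phoneme (st.1, st.2.1 ++ [phoneme], st.2.2.1, st.2.2.2 ++ [i]) rest
    else
      pvInnerA i phoneme st rest

def get_phoneme_count_to_rhyme (phoneme_input : List String) : List Int :=
  let st := (PySem.List.enumerate phoneme_input 0).foldl
      (fun st ip => pvInnerA ip.1 ip.2 st pvDIGITS) (0, [], [], [])
  let syl := st.2.2.1
  let vow := st.2.2.2
  let n : Int := phoneme_input.length
  -- 'count = 0' in A is never used; the try/except IndexError chain stops at the first failing index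
  match PySem.List.pyGet? vow (-1) with
  | none => []
  | some v =>
    match PySem.List.pyGet? syl (-1) with
    | none => [n - v]
    | some s1 =>
      match PySem.List.pyGet? syl (-2) with
      | none => [n - v, n - s1]
      | some s2 =>
        match PySem.List.pyGet? syl (-3) with
        | none => [n - v, n - s1, n - s2]
        | some s3 => [n - v, n - s1, n - s2, n - s3]

-- ===== PORT B =====
def pvHasDigit (p : String) : Bool := pvDIGITS.any (fun d => PySem.Str.isIn d p)

def pvStepB (phoneme_input : List String) (st : Option Int × List Int) (i : Int) :
    Option Int × List Int :=
  let p := (PySem.List.pyGet? phoneme_input i).getD ""   -- i is always in range in this loop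
  if pvHasDigit p then
    (st.1, if st.2.length < 3 then st.2 ++ [i] else st.2)
  else
    match st.1 with
    | none => (some i, st.2)
    | some _ => st

def get_phoneme_count_to_rhyme_alt (phoneme_input : List String) : List Int :=
  let n : Int := phoneme_input.length
  let st := (PySem.List.pyRange (n - 1) (-1) (-1)).foldl (pvStepB phoneme_input) (none, [])
  match st.1 with
  | none => []
  | some lp => (n - lp) :: st.2.map (fun j => n - j)

-- ===== PRECONDITION & SPEC =====
def Spec_get_phoneme_count_to_rhyme (phoneme_input : List String) (out : List Int) : Prop := out = get_phoneme_count_to_rhyme_alt phoneme_input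
instance (phoneme_input : List String) (out : List Int) : Decidable (Spec_get_phoneme_count_to_rhyme phoneme_input out) := by unfold Spec_get_phoneme_count_to_rhyme; infer_instance

-- ===== CLAIM (what is proved, stated in full; the proofs are below) =====
def Claim_equal_get_phoneme_count_to_rhyme : Prop := ∀ (phoneme_input : List String), Dom_get_phoneme_count_to_rhyme phoneme_input → Spec_get_phoneme_count_to_rhyme phoneme_input (get_phoneme_count_to_rhyme phoneme_input)

-- ===== LEMMAS AND PROOFS =====

-- index lists of the digit-bearing and digit-free phonemes of an enumerated list
def pvSylOf (l : List (Int × String)) : List Int :=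
  (l.filter (fun ip => pvHasDigit ip.2)).map (·.1)
def pvVowOf (l : List (Int × String)) : List Int :=
  (l.filter (fun ip => !pvHasDigit ip.2)).map (·.1)

lemma pvDIGITS_eq : pvDIGITS = ["0","1","2","3","4","5","6","7","8","9"] := by decide

-- A's inner digit loop only ever appends i to syllable_location (if some digit occurs in p)
-- or to vowel_location (otherwise)
lemma pvInnerA_loc (i : Int) (p : String) (st : Int × List String × List Int × List Int) :
    (pvInnerA i p st pvDIGITS).2.2 =
      if pvHasDigit p then (st.2.2.1 ++ [i], st.2.2.2) else (st.2.2.1, st.2.2.2 ++ [i]) := by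
  have hd : pvHasDigit p
      = (["0","1","2","3","4","5","6","7","8","9"] : List String).any
          (fun d => PySem.Str.isIn d p) := by rw [pvHasDigit, pvDIGITS_eq]
  rw [pvDIGITS_eq]
  simp only [PySem.Str.isIn_eq] at hd
  by_cases h0 : PySem.Chars.isIn ['0'] p.toList = true
  · simp [pvInnerA, hd, h0]
  by_cases h1 : PySem.Chars.isIn ['1'] p.toList = true
  · simp [pvInnerA, hd, h0, h1]
  by_cases h2 : PySem.Chars.isIn ['2'] p.toList = true
  · simp [pvInnerA, hd, h0, h1, h2]
  by_cases h3 : PySem.Chars.isIn ['3'] p.toList = true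
  · simp [pvInnerA, hd, h0, h1, h2, h3]
  by_cases h4 : PySem.Chars.isIn ['4'] p.toList = true
  · simp [pvInnerA, hd, h0, h1, h2, h3, h4]
  by_cases h5 : PySem.Chars.isIn ['5'] p.toList = true
  · simp [pvInnerA, hd, h0, h1, h2, h3, h4, h5]
  by_cases h6 : PySem.Chars.isIn ['6'] p.toList = true
  · simp [pvInnerA, hd, h0, h1, h2, h3, h4, h5, h6]
  by_cases h7 : PySem.Chars.isIn ['7'] p.toList = true
  · simp [pvInnerA, hd, h0, h1, h2, h3, h4, h5, h6, h7]
  by_cases h8 : PySem.Chars.isIn ['8'] p.toList = true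
  · simp [pvInnerA, hd, h0, h1, h2, h3, h4, h5, h6, h7, h8]
  by_cases h9 : PySem.Chars.isIn ['9'] p.toList = true
  · simp [pvInnerA, hd, h0, h1, h2, h3, h4, h5, h6, h7, h8, h9]
  · simp [pvInnerA, hd, h0, h1, h2, h3, h4, h5, h6, h7, h8, h9]

-- A's outer loop collects exactly the digit-bearing indices and the digit-free indices, in order
lemma pvFoldA_loc (l : List (Int × String)) (st : Int × List String × List Int × List Int) :
    ((l.foldl (fun st ip => pvInnerA ip.1 ip.2 st pvDIGITS) st)).2.2 =
      (st.2.2.1 ++ pvSylOf l, st.2.2.2 ++ pvVowOf l) := by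
  induction l generalizing st with
  | nil => simp [pvSylOf, pvVowOf]
  | cons ip rest ih =>
    simp only [List.foldl_cons]
    rw [ih]
    have h := pvInnerA_loc ip.1 ip.2 st
    by_cases hd : pvHasDigit ip.2
    · rw [if_pos hd] at h
      have ha : (pvInnerA ip.1 ip.2 st pvDIGITS).2.2.1 = st.2.2.1 ++ [ip.1] := by rw [h]
      have hb : (pvInnerA ip.1 ip.2 st pvDIGITS).2.2.2 = st.2.2.2 := by rw [h]
      simp [pvSylOf, pvVowOf, hd, ha, hb]
    · rw [if_neg hd] at h
      have ha : (pvInnerA ip.1 ip.2 st pvDIGITS).2.2.1 = st.2.2.1 := by rw [h]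
      have hb : (pvInnerA ip.1 ip.2 st pvDIGITS).2.2.2 = st.2.2.2 ++ [ip.1] := by rw [h]
      simp [pvSylOf, pvVowOf, hd, ha, hb]

-- Python xs[-(k+1)] is xs.reverse[k]
lemma pvGet_neg_rev {α : Type} (xs : List α) (k : Nat) :
    PySem.List.pyGet? xs (-((k : Int) + 1)) = xs.reverse[k]? := by
  by_cases h : k < xs.length
  · have hc : PySem.List.pyGet? xs (-((k : Int) + 1))
        = PySem.List.pyGet? xs (-(((k + 1 : Nat)) : Int)) := by norm_num
    rw [hc, PySem.List.pyGet?_neg_natCast xs (k + 1) (by omega) (by omega),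
      List.getElem?_reverse h]
    congr 1
    omega
  · rw [List.getElem?_eq_none (by simp; omega)]
    rw [PySem.List.pyGet?_eq_none_iff]
    simp [PySem.Raise.InRange]
    omega

-- B's backward scan yields the last digit-free index and the last up-to-3 digit indices
lemma pvFoldB (xs : List String) (l : List (Int × String))
    (hx : ∀ ip ∈ l, (PySem.List.pyGet? xs ip.1).getD "" = ip.2) :
    l.foldr (fun ip st => pvStepB xs st ip.1) (none, []) =
      ((pvVowOf l).getLast?, (pvSylOf l).reverse.take 3) := by
  induction l with
  | nil => simp [pvVowOf, pvSylOf]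
  | cons ip rest ih =>
    have hr : ∀ q ∈ rest, (PySem.List.pyGet? xs q.1).getD "" = q.2 := fun q hq =>
      hx q (List.mem_cons_of_mem _ hq)
    have hp : (PySem.List.pyGet? xs ip.1).getD "" = ip.2 := hx ip (List.mem_cons_self ..)
    simp only [List.foldr_cons, ih hr]
    by_cases hd : pvHasDigit ip.2
    · have hsyl : pvSylOf (ip :: rest) = ip.1 :: pvSylOf rest := by
        simp [pvSylOf, hd]
      have hvow : pvVowOf (ip :: rest) = pvVowOf rest := by
        simp [pvVowOf, hd]
      rw [hsyl, hvow]
      simp only [pvStepB, hp, hd, if_true]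
      rw [List.reverse_cons, List.take_append]
      have hlen : (pvSylOf rest).reverse.length = (pvSylOf rest).length :=
        List.length_reverse
      by_cases hl : (pvSylOf rest).length < 3
      · have htk : (pvSylOf rest).reverse.take 3 = (pvSylOf rest).reverse :=
          List.take_of_length_le (by omega)
        have hc : ((pvSylOf rest).reverse.take 3).length < 3 := by
          simp [List.length_take]; omega
        have hm : 3 - (pvSylOf rest).reverse.length
            = (3 - (pvSylOf rest).reverse.length - 1) + 1 := by rw [hlen]; omega
        rw [if_pos hc, htk, hm, List.take_succ_cons, List.take_nil]
      · have h3 : 3 - (pvSylOf rest).reverse.length = 0 := by rw [hlen]; omega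
        have hc : ¬ ((pvSylOf rest).reverse.take 3).length < 3 := by
          simp [List.length_take]; omega
        rw [if_neg hc, h3, List.take_zero, List.append_nil]
    · have hsyl : pvSylOf (ip :: rest) = pvSylOf rest := by
        simp [pvSylOf, hd]
      have hvow : pvVowOf (ip :: rest) = ip.1 :: pvVowOf rest := by
        simp [pvVowOf, hd]
      rw [hsyl, hvow]
      simp only [pvStepB, hp, hd, if_false, Bool.false_eq_true]
      cases hv : pvVowOf rest with
      | nil => simp
      | cons v vs =>
        rcases hg : (v :: vs).getLast? with _ | w
        · simp at hg
        · simp [hg]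

-- A's try/except readout from the full location lists equals B's readout from its scan state
lemma pvAssemble (n : Int) (syl vow : List Int) :
    (match PySem.List.pyGet? vow (-1) with
     | none => ([] : List Int)
     | some v =>
       match PySem.List.pyGet? syl (-1) with
       | none => [n - v]
       | some s1 =>
         match PySem.List.pyGet? syl (-2) with
         | none => [n - v, n - s1]
         | some s2 =>
           match PySem.List.pyGet? syl (-3) with
           | none => [n - v, n - s1, n - s2]
           | some s3 => [n - v, n - s1, n - s2, n - s3])
    = (match vow.getLast? with
       | none => []
       | some lp => (n - lp) :: (syl.reverse.take 3).map (fun j => n - j)) := by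
  rw [PySem.List.pyGet?_neg_one]
  have e1 : PySem.List.pyGet? syl (-1) = syl.reverse[0]? := by
    have := pvGet_neg_rev syl 0; norm_num at this; exact this
  have e2 : PySem.List.pyGet? syl (-2) = syl.reverse[1]? := by
    have := pvGet_neg_rev syl 1; norm_num at this; exact this
  have e3 : PySem.List.pyGet? syl (-3) = syl.reverse[2]? := by
    have := pvGet_neg_rev syl 2; norm_num at this; exact this
  rw [e1, e2, e3]
  cases vow.getLast? with
  | none => rfl
  | some v =>
    generalize syl.reverse = r
    rcases r with _ | ⟨a, _ | ⟨b, _ | ⟨c, t⟩⟩⟩ <;> simp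

-- ===== VERDICT (by name: the statement is the Claim_ definition above) =====
theorem get_phoneme_count_to_rhyme_spec : Claim_equal_get_phoneme_count_to_rhyme := by
  intro xs _
  unfold Spec_get_phoneme_count_to_rhyme get_phoneme_count_to_rhyme get_phoneme_count_to_rhyme_alt
  have hA := pvFoldA_loc (PySem.List.enumerate xs 0) (0, [], [], [])
  have hA1 : (((PySem.List.enumerate xs 0).foldl
      (fun st ip => pvInnerA ip.1 ip.2 st pvDIGITS) (0, [], [], []))).2.2.1
      = pvSylOf (PySem.List.enumerate xs 0) := by rw [hA]; simp
  have hA2 : (((PySem.List.enumerate xs 0).foldl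
      (fun st ip => pvInnerA ip.1 ip.2 st pvDIGITS) (0, [], [], []))).2.2.2
      = pvVowOf (PySem.List.enumerate xs 0) := by rw [hA]; simp
  have hrange : PySem.List.pyRange ((xs.length : Int) - 1) (-1) (-1)
      = ((PySem.List.enumerate xs 0).map (fun x => x.1)).reverse := by
    rw [PySem.List.pyRange_neg_one_eq_reverse, PySem.List.map_fst_enumerate]
    norm_num
  have hB : (PySem.List.pyRange ((xs.length : Int) - 1) (-1) (-1)).foldl
        (pvStepB xs) (none, [])
      = ((pvVowOf (PySem.List.enumerate xs 0)).getLast?,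
         (pvSylOf (PySem.List.enumerate xs 0)).reverse.take 3) := by
    rw [hrange, List.foldl_reverse, List.foldr_map]
    refine pvFoldB xs _ ?_
    intro ip hip
    rw [PySem.List.mem_enumerate_iff] at hip
    obtain ⟨k, hk, rfl⟩ := hip
    simp [hk]
  simp only [hA1, hA2, hB]
  exact pvAssemble (xs.length : Int) (pvSylOf (PySem.List.enumerate xs 0))
    (pvVowOf (PySem.List.enumerate xs 0))
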